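-- pv_equiv track=rewrite | github.com/qiskit-community/qiskit-research | qiskit_research/mzm_generation/utils.py | evaluate_diagonal_op
-- ===== SOURCE A (Python) =====
-- def evaluate_diagonal_op(operator: str, bitstring: str) -> int:
--     """Evaluate a diagional operator on a bitstring."""
--     prod = 1
--     for op, bit in zip(operator, bitstring):
--         if op in ("0", "1"):
--             prod *= bit == op
--         elif op == "Z":
--             prod *= (-1) ** (bit == "1")
--     return prod
-- ===== SOURCE B (Python) =====
-- def evaluate_diagonal_op(operator: str, bitstring: str) -> int:
--     """Evaluate a diagonal operator on a bitstring."""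
--     pairs = list(zip(operator, bitstring))
--     matched = all(bit == op for op, bit in pairs if op in ("0", "1"))
--     parity = sum(1 for op, bit in pairs if op == "Z" and bit == "1")
--     return (-1) ** parity if matched else 0
-- ===== Notes on version B (the rewrite author's own statement) =====
-- stated objective: simpler
-- what changed: Replace the fused running product with two independent quantities: a match flag over the '0'/'1' positions and a parity count over the 'Z' positions, combined in a closed form (-1)**parity if matched else 0.
import Mathlib
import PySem

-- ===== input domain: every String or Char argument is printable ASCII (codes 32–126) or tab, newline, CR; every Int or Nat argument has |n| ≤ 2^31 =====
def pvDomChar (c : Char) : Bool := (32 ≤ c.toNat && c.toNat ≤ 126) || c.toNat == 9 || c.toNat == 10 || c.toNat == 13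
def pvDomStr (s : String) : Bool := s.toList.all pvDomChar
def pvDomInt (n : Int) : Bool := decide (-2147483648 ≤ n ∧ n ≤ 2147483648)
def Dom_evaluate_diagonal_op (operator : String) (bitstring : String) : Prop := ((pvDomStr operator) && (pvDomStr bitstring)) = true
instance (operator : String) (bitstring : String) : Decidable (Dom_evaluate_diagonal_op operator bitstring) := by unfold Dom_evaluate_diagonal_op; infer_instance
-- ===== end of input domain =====

-- B: instead of A's fused running product, computes a match flag over the '0'/'1'
-- positions and a parity count over the 'Z' positions, combined in closed form (simpler).

-- ===== PORT A =====
def evaluate_diagonal_op (operator : String) (bitstring : String) : Int :=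
  (List.zip operator.toList bitstring.toList).foldl
    (fun prod ob =>
      if ob.1 = '0' ∨ ob.1 = '1' then prod * (if ob.2 = ob.1 then 1 else 0)
      else if ob.1 = 'Z' then prod * ((-1 : Int) ^ (if ob.2 = '1' then 1 else 0))
      else prod) 1

-- ===== PORT B =====
def pvMatchOk (ob : Char × Char) : Bool := !(ob.1 = '0' ∨ ob.1 = '1') || decide (ob.2 = ob.1)
def pvZOne (ob : Char × Char) : Bool := decide (ob.1 = 'Z') && decide (ob.2 = '1')
def evaluate_diagonal_op_alt (operator : String) (bitstring : String) : Int :=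
  let pairs := List.zip operator.toList bitstring.toList
  let matched := pairs.all pvMatchOk
  let parity := (pairs.filter pvZOne).length
  if matched then (-1 : Int) ^ parity else 0

-- ===== PRECONDITION & SPEC =====
def Spec_evaluate_diagonal_op (operator : String) (bitstring : String) (out : Int) : Prop := out = evaluate_diagonal_op_alt operator bitstring
instance (operator : String) (bitstring : String) (out : Int) : Decidable (Spec_evaluate_diagonal_op operator bitstring out) := by unfold Spec_evaluate_diagonal_op; infer_instance

-- ===== CLAIM (what is proved, stated in full; the proofs are below) =====
def Claim_equal_evaluate_diagonal_op : Prop := ∀ (operator : String) (bitstring : String), Dom_evaluate_diagonal_op operator bitstring → Spec_evaluate_diagonal_op operator bitstring (evaluate_diagonal_op operator bitstring)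

-- ===== LEMMAS AND PROOFS =====

-- closed-form value of B on a pair list
def pvVal (l : List (Char × Char)) : Int :=
  if l.all pvMatchOk then (-1 : Int) ^ (l.filter pvZOne).length else 0

lemma pvVal_cons (o b : Char) (tl : List (Char × Char)) :
    pvVal ((o, b) :: tl) =
      (if o = '0' ∨ o = '1' then (if b = o then (1 : Int) else 0)
       else if o = 'Z' then (if b = '1' then -1 else 1) else 1) * pvVal tl := by
  cases hA : tl.all pvMatchOk with
  | false =>
    simp only [pvVal, List.all_cons, hA, Bool.and_false, if_neg, Bool.false_eq_true,
      not_false_eq_true, mul_zero]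
  | true =>
    simp only [pvVal, List.all_cons, hA, Bool.and_true, List.filter_cons, pvMatchOk, pvZOne]
    by_cases h01 : o = '0' ∨ o = '1'
    · have hz : ¬ o = 'Z' := by rcases h01 with h | h <;> simp [h]
      by_cases hb : b = o <;> simp [h01, hb, hz]
    · by_cases hz : o = 'Z'
      · by_cases hb : b = '1' <;> simp [hz, hb, pow_succ, mul_comm]
      · simp [h01, hz]

lemma pvFold_eq (l : List (Char × Char)) (p : Int) :
    l.foldl (fun prod ob =>
      if ob.1 = '0' ∨ ob.1 = '1' then prod * (if ob.2 = ob.1 then 1 else 0)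
      else if ob.1 = 'Z' then prod * ((-1 : Int) ^ (if ob.2 = '1' then 1 else 0))
      else prod) p = p * pvVal l := by
  induction l generalizing p with
  | nil => simp [pvVal]
  | cons hd tl ih =>
    obtain ⟨o, b⟩ := hd
    rw [List.foldl_cons, ih, pvVal_cons]
    split_ifs <;> ring

-- ===== VERDICT (by name: the statement is the Claim_ definition above) =====
theorem evaluate_diagonal_op_spec : Claim_equal_evaluate_diagonal_op := by
  intro operator bitstring _
  unfold Spec_evaluate_diagonal_op evaluate_diagonal_op evaluate_diagonal_op_alt
  rw [pvFold_eq]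
  simp [pvVal]
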